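-- pv_equiv track=rewrite | github.com/Nobel-Ken/Magtility | dsp.py | findTimings
-- ===== SOURCE A (Python) =====
-- def sign(num):
--     if num >= 0:
--         return True
--     if num < 0:
--         return False
--
-- def findTimings(samples):
--     if len(samples) == 0:
--         return 0,0,0
--     lastVal = samples[0]
--     highestVal = 0
--     zeros = [0]
--     peaks = []
--     timings = []
--     #FIND ZERO CROSSINGS AND PEAKS
--     for i, sample in enumerate(samples):
--         if abs(sample) > abs(samples[highestVal]):
--             highestVal = i
--         if sign(sample) != sign(lastVal):
--             zeros.append(i)
--             peaks.append(highestVal)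
--             lastVal = sample
--             highestVal = i
--     #FIND PEAK TIMINGS
--     for i in range(1, len(peaks)):
--         timings.append(peaks[i] - peaks[i-1])
--     return zeros, peaks, timings
-- ===== SOURCE B (Python) =====
-- def _seg_peak(samples, a, b):
--     best = a
--     for j in range(a + 1, b + 1):
--         if abs(samples[j]) > abs(samples[best]):
--             best = j
--     return best
--
-- def findTimings(samples):
--     if len(samples) == 0:
--         return 0, 0, 0
--     zeros = [0]
--     for i in range(1, len(samples)):
--         if (samples[i] >= 0) != (samples[i - 1] >= 0):
--             zeros.append(i)
--     peaks = [_seg_peak(samples, a, b) for a, b in zip(zeros, zeros[1:])]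
--     timings = [q - p for p, q in zip(peaks, peaks[1:])]
--     return zeros, peaks, timings
-- ===== Notes on version B (the rewrite author's own statement) =====
-- stated objective: alternative
-- what changed: Replaces A's single stateful pass (running argmax with crossing-triggered resets, peaks built inline) by a three-phase decomposition: first collect the zero-crossing indices, then compute each peak as the earliest argmax of |samples| over each inclusive crossing segment, then timings as consecutive differences via zip.
-- outside the precondition, e.g. on findTimings([]): A returns (0, 0, 0), B returns (0, 0, 0)
import Mathlib
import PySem

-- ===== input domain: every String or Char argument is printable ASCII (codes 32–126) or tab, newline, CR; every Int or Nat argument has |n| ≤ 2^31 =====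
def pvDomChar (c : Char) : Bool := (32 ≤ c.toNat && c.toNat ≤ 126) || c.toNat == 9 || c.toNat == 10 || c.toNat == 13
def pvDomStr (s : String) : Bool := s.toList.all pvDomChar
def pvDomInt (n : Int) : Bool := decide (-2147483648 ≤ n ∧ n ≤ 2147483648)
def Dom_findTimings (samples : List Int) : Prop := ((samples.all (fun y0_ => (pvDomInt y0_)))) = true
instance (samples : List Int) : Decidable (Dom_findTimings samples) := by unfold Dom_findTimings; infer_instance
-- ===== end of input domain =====

-- B re-derives the same (zeros, peaks, timings) by a three-phase decomposition (crossings first,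
-- then per-segment argmax, then zip differences) instead of A's single stateful pass; same cost.

-- ===== PORT A =====
-- Python's sign(num): True iff num >= 0
def pvSign (num : Int) : Bool := decide (0 ≤ num)
-- in-range list indexing xs[i] (every index either port uses is in range)
def pvAt (xs : List Int) (i : Int) : Int := PySem.List.pyGetD xs i 0

-- the body of A's first for-loop, on state (lastVal, highestVal, zeros, peaks)
def stepA (samples : List Int) (st : Int × Int × List Int × List Int) (is : Int × Int) :
    Int × Int × List Int × List Int :=
  let lastVal := st.1
  let highestVal := st.2.1
  let zeros := st.2.2.1
  let peaks := st.2.2.2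
  let i := is.1
  let sample := is.2
  let hv := if |sample| > |pvAt samples highestVal| then i else highestVal
  if pvSign sample != pvSign lastVal then
    (sample, i, zeros ++ [i], peaks ++ [hv])
  else
    (lastVal, hv, zeros, peaks)

def findTimings (samples : List Int) : List Int × List Int × List Int :=
  match samples with
  | [] => ([], [], [])   -- Python returns a tuple of three int zeros here, not lists; excluded by Pre_
  | s0 :: _ =>
    let st := (PySem.List.enumerate samples 0).foldl (stepA samples) (s0, 0, [0], [])
    let zeros := st.2.2.1
    let peaks := st.2.2.2
    let timings := (PySem.List.pyRange 1 peaks.length 1).foldl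
      (fun acc i => acc ++ [pvAt peaks i - pvAt peaks (i - 1)]) []
    (zeros, peaks, timings)

-- ===== PORT B =====
-- earliest index of the maximal |samples[j]| over the inclusive range a..b (Source B's _seg_peak)
def segPeak (samples : List Int) (a b : Int) : Int :=
  (PySem.List.pyRange (a + 1) (b + 1) 1).foldl
    (fun best j => if |pvAt samples j| > |pvAt samples best| then j else best) a

def findTimings_alt (samples : List Int) : List Int × List Int × List Int :=
  match samples with
  | [] => ([], [], [])   -- Python returns a tuple of three int zeros here, not lists; excluded by Pre_
  | _ =>
    let zeros := (PySem.List.pyRange 1 samples.length 1).foldl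
      (fun zs i => if pvSign (pvAt samples i) != pvSign (pvAt samples (i - 1)) then zs ++ [i] else zs)
      [0]
    let peaks := (zeros.zip zeros.tail).map (fun ab => segPeak samples ab.1 ab.2)
    let timings := (peaks.zip peaks.tail).map (fun pq => pq.2 - pq.1)
    (zeros, peaks, timings)

-- ===== PRECONDITION & SPEC =====
-- Pre_ excludes only the empty list, on which A returns a tuple of three int zeros — not a value of the
-- declared (List, List, List) type.
def Pre_findTimings (samples : List Int) : Prop := samples ≠ []
instance (samples : List Int) : Decidable (Pre_findTimings samples) := by unfold Pre_findTimings; infer_instance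
def pvWitness_findTimings : List Int := [1, -2, 3]

def Spec_findTimings (samples : List Int) (out : List Int × List Int × List Int) : Prop := out = findTimings_alt samples
instance (samples : List Int) (out : List Int × List Int × List Int) : Decidable (Spec_findTimings samples out) := by unfold Spec_findTimings; infer_instance

-- ===== CLAIM (what is proved, stated in full; the proofs are below) =====
def Claim_equal_findTimings : Prop := ∀ (samples : List Int), Dom_findTimings samples → Pre_findTimings samples → Spec_findTimings samples (findTimings samples)

-- ===== LEMMAS AND PROOFS =====

-- crossing indices of `rest`, whose first element sits at index i and whose predecessor is prev
def crossAux (prev : Int) (i : Int) (rest : List Int) : List Int :=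
  match rest with
  | [] => []
  | x :: t => if pvSign x != pvSign prev then i :: crossAux x (i + 1) t else crossAux x (i + 1) t

-- the peaks A appends while scanning `rest` from index i, last crossing at z, previous value prev
def peakAux (S : List Int) (z : Int) (prev : Int) (i : Int) (rest : List Int) : List Int :=
  match rest with
  | [] => []
  | x :: t =>
    if pvSign x != pvSign prev then segPeak S z i :: peakAux S i x (i + 1) t
    else peakAux S z x (i + 1) t

lemma crossAux_congr (p q i : Int) (r : List Int) (h : pvSign p = pvSign q) :
    crossAux p i r = crossAux q i r := by
  cases r with
  | nil => rfl
  | cons x t => simp [crossAux, h]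

lemma peakAux_congr (S : List Int) (z p q i : Int) (r : List Int) (h : pvSign p = pvSign q) :
    peakAux S z p i r = peakAux S z q i r := by
  cases r with
  | nil => rfl
  | cons x t => simp [peakAux, h]

lemma segPeak_self (S : List Int) (a : Int) : segPeak S a a = a := by
  simp [segPeak, PySem.List.pyRange_one_eq_nil (le_refl (a + 1))]

lemma segPeak_succ (S : List Int) (a b : Int) (h : a ≤ b) :
    segPeak S a (b + 1) =
      if |pvAt S (b + 1)| > |pvAt S (segPeak S a b)| then b + 1 else segPeak S a b := by
  unfold segPeak
  rw [PySem.List.pyRange_one_succ_right (by omega : a + 1 ≤ b + 1), List.foldl_append]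
  rfl

lemma drop_facts (S : List Int) (i : Nat) (x : Int) (t : List Int) (h : S.drop i = x :: t) :
    i < S.length ∧ S.drop (i + 1) = t ∧ pvAt S (i : Int) = x := by
  have hl := congrArg List.length h
  simp [List.length_drop] at hl
  have hlen : i < S.length := by omega
  have hgd := List.getElem_cons_drop (as := S) (i := i) hlen
  rw [h] at hgd
  injection hgd with hx ht
  refine ⟨hlen, ht, ?_⟩
  simp [pvAt, PySem.List.pyGetD_natCast, List.getD, hlen, hx]

lemma foldA_eq (S : List Int) :
    ∀ (rest : List Int) (i : Nat) (z lv : Int) (zs pk : List Int),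
      S.drop i = rest → 1 ≤ i → 0 ≤ z → z < (i : Int) →
      pvSign lv = pvSign (pvAt S ((i : Int) - 1)) →
      ((PySem.List.enumerate rest (i : Int)).foldl (stepA S)
          (lv, segPeak S z ((i : Int) - 1), zs, pk)).2.2
        = (zs ++ crossAux lv (i : Int) rest, pk ++ peakAux S z lv (i : Int) rest) := by
  intro rest
  induction rest with
  | nil => intro i z lv zs pk _ _ _ _ _; simp [PySem.List.enumerate, crossAux, peakAux]
  | cons x t ih =>
    intro i z lv zs pk hdrop hi hz0 hzi hsg
    obtain ⟨hlen, hdrop', hx⟩ := drop_facts S i x t hdrop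
    rw [PySem.List.enumerate_cons]
    rw [List.foldl_cons]
    have hseg : segPeak S z ((i : Int) - 1 + 1) =
        if |pvAt S ((i : Int) - 1 + 1)| > |pvAt S (segPeak S z ((i : Int) - 1))| then (i : Int) - 1 + 1
        else segPeak S z ((i : Int) - 1) := segPeak_succ S z ((i : Int) - 1) (by omega)
    have hii : (i : Int) - 1 + 1 = (i : Int) := by ring
    rw [hii] at hseg
    have hc1 : ((i + 1 : Nat) : Int) = (i : Int) + 1 := by push_cast; ring
    have hc2 : ((i + 1 : Nat) : Int) - 1 = (i : Int) := by push_cast; ring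
    by_cases hcr : pvSign x = pvSign lv
    · -- no crossing
      have hstep : stepA S (lv, segPeak S z ((i : Int) - 1), zs, pk) ((i : Int), x)
          = (lv, segPeak S z ((i : Int)), zs, pk) := by
        simp [stepA, hcr, hseg, hx]
      rw [hstep]
      have hsg' : pvSign lv = pvSign (pvAt S (((i + 1 : Nat) : Int) - 1)) := by
        rw [hc2, hx, hcr]
      have hIH := ih (i + 1) z lv zs pk hdrop' (by omega) hz0 (by push_cast; omega) hsg'
      rw [hc2, hc1] at hIH
      rw [hIH]
      have h1 : crossAux lv (i : Int) (x :: t) = crossAux lv ((i : Int) + 1) t := by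
        simp only [crossAux, hcr]
        simp [crossAux_congr x lv ((i : Int) + 1) t (hcr)]
      have h2 : peakAux S z lv (i : Int) (x :: t) = peakAux S z lv ((i : Int) + 1) t := by
        simp only [peakAux, hcr]
        simp [peakAux_congr S z x lv ((i : Int) + 1) t hcr]
      rw [h1, h2]
    · -- crossing at i
      have hstep : stepA S (lv, segPeak S z ((i : Int) - 1), zs, pk) ((i : Int), x)
          = (x, (i : Int), zs ++ [(i : Int)], pk ++ [segPeak S z (i : Int)]) := by
        simp [stepA, hcr, hseg, hx]
      rw [hstep]
      have hsg' : pvSign x = pvSign (pvAt S (((i + 1 : Nat) : Int) - 1)) := by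
        rw [hc2, hx]
      have hIH := ih (i + 1) (i : Int) x (zs ++ [(i : Int)]) (pk ++ [segPeak S z (i : Int)]) hdrop'
        (by omega) (by positivity) (by push_cast; omega) hsg'
      rw [hc2, segPeak_self, hc1] at hIH
      rw [hIH]
      have h1 : crossAux lv (i : Int) (x :: t) = (i : Int) :: crossAux x ((i : Int) + 1) t := by
        simp [crossAux, hcr]
      have h2 : peakAux S z lv (i : Int) (x :: t)
          = segPeak S z (i : Int) :: peakAux S (i : Int) x ((i : Int) + 1) t := by
        simp [peakAux, hcr]
      rw [h1, h2]
      simp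

lemma zerosB_eq (S : List Int) :
    ∀ (rest : List Int) (i : Nat) (acc : List Int),
      S.drop i = rest → 1 ≤ i →
      (PySem.List.pyRange (i : Int) (S.length : Int) 1).foldl
          (fun zs j => if pvSign (pvAt S j) != pvSign (pvAt S (j - 1)) then zs ++ [j] else zs) acc
        = acc ++ crossAux (pvAt S ((i : Int) - 1)) (i : Int) rest := by
  intro rest
  induction rest with
  | nil =>
    intro i acc hdrop _
    have hle : S.length ≤ i := List.drop_eq_nil_iff.mp hdrop
    rw [PySem.List.pyRange_one_eq_nil (by exact_mod_cast hle)]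
    simp [crossAux]
  | cons x t ih =>
    intro i acc hdrop hi
    obtain ⟨hlen, hdrop', hx⟩ := drop_facts S i x t hdrop
    rw [PySem.List.pyRange_one_cons (by exact_mod_cast hlen)]
    rw [List.foldl_cons]
    have hcast : ((i : Int) + 1) = ((i + 1 : Nat) : Int) := by push_cast; ring
    by_cases hcr : pvSign x = pvSign (pvAt S ((i : Int) - 1))
    · have hcond : (pvSign (pvAt S (i : Int)) != pvSign (pvAt S ((i : Int) - 1))) = false := by
        simp [hx, hcr]
      rw [hcond]
      simp only [Bool.false_eq_true, if_false]
      rw [hcast, ih (i + 1) acc hdrop' (by omega)]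
      have hprev : pvAt S (((i + 1 : Nat) : Int) - 1) = x := by
        have : (((i + 1 : Nat) : Int) - 1) = (i : Int) := by push_cast; ring
        rw [this, hx]
      rw [hprev]
      have : crossAux (pvAt S ((i : Int) - 1)) (i : Int) (x :: t) = crossAux x ((i : Int) + 1) t := by
        simp only [crossAux, hcr]
        simp
      rw [this, hcast]
    · have hcond : (pvSign (pvAt S (i : Int)) != pvSign (pvAt S ((i : Int) - 1))) = true := by
        simp [hx]; exact hcr
      rw [hcond]
      simp only [if_true]
      rw [hcast, ih (i + 1) (acc ++ [(i : Int)]) hdrop' (by omega)]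
      have hprev : pvAt S (((i + 1 : Nat) : Int) - 1) = x := by
        have : (((i + 1 : Nat) : Int) - 1) = (i : Int) := by push_cast; ring
        rw [this, hx]
      rw [hprev]
      have : crossAux (pvAt S ((i : Int) - 1)) (i : Int) (x :: t)
          = (i : Int) :: crossAux x ((i : Int) + 1) t := by
        simp [crossAux, hcr]
      rw [this, hcast]
      simp

lemma pairs_crossAux (S : List Int) :
    ∀ (rest : List Int) (i z prev : Int),
      (((z :: crossAux prev i rest).zip (crossAux prev i rest)).map
          (fun ab => segPeak S ab.1 ab.2))
        = peakAux S z prev i rest := by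
  intro rest
  induction rest with
  | nil => intro i z prev; simp [crossAux, peakAux]
  | cons x t ih =>
    intro i z prev
    by_cases hcr : pvSign x = pvSign prev
    · simp only [crossAux, peakAux, hcr, bne_self_eq_false]
      simp only [Bool.false_eq_true, if_false]
      exact ih (i + 1) z x
    · have hb : (pvSign x != pvSign prev) = true := by simp [hcr]
      simp only [crossAux, peakAux, hb, if_true]
      rw [List.zip_cons_cons, List.map_cons]
      rw [ih (i + 1) i x]

lemma timings_eq (pk : List Int) :
    ∀ (rest : List Int) (i : Nat) (acc : List Int),
      pk.drop i = rest → 1 ≤ i →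
      (PySem.List.pyRange (i : Int) (pk.length : Int) 1).foldl
          (fun acc j => acc ++ [pvAt pk j - pvAt pk (j - 1)]) acc
        = acc ++ ((pk.drop (i - 1)).zip rest).map (fun pq => pq.2 - pq.1) := by
  intro rest
  induction rest with
  | nil =>
    intro i acc hdrop _
    have hle : pk.length ≤ i := List.drop_eq_nil_iff.mp hdrop
    rw [PySem.List.pyRange_one_eq_nil (by exact_mod_cast hle)]
    simp
  | cons x t ih =>
    intro i acc hdrop hi
    obtain ⟨hlen, hdrop', hx⟩ := drop_facts pk i x t hdrop
    have hlen1 : i - 1 < pk.length := by omega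
    have hdprev : pk.drop (i - 1) = pk[i - 1] :: pk.drop i := by
      have h2 := List.getElem_cons_drop (as := pk) (i := i - 1) hlen1
      rw [(by omega : i - 1 + 1 = i)] at h2
      exact h2.symm
    have hprevval : pvAt pk ((i : Int) - 1) = pk[i - 1] := by
      have hc : (i : Int) - 1 = ((i - 1 : Nat) : Int) := by omega
      rw [hc]
      simp [pvAt, PySem.List.pyGetD_natCast, List.getD, hlen1]
    rw [PySem.List.pyRange_one_cons (by exact_mod_cast hlen)]
    rw [List.foldl_cons]
    have hcast : ((i : Int) + 1) = ((i + 1 : Nat) : Int) := by push_cast; ring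
    rw [hcast, ih (i + 1) (acc ++ [pvAt pk (i : Int) - pvAt pk ((i : Int) - 1)]) hdrop' (by omega)]
    rw [(by omega : i + 1 - 1 = i), hdprev, hdrop, hx, hprevval]
    rw [List.zip_cons_cons, List.map_cons]
    simp

-- B's zeros list, peeled to the crossAux form, for a nonempty list
lemma zerosB_closed (s0 : Int) (t : List Int) :
    ((PySem.List.pyRange 1 ((s0 :: t).length : Int) 1).foldl
        (fun zs j => if pvSign (pvAt (s0 :: t) j) != pvSign (pvAt (s0 :: t) (j - 1)) then zs ++ [j] else zs)
        [0])
      = 0 :: crossAux s0 1 t := by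
  have h := zerosB_eq (s0 :: t) t 1 [0] (by simp) (le_refl 1)
  have hcast : ((1 : Nat) : Int) = 1 := by norm_num
  rw [hcast] at h
  rw [h]
  have : pvAt (s0 :: t) (1 - 1) = s0 := by norm_num [pvAt]
  rw [this]
  simp

-- A's fold, pushed to the crossAux/peakAux form, for a nonempty list
lemma foldA_closed (s0 : Int) (t : List Int) :
    ((PySem.List.enumerate (s0 :: t) 0).foldl (stepA (s0 :: t)) (s0, 0, [0], [])).2.2
      = (0 :: crossAux s0 1 t, peakAux (s0 :: t) 0 s0 1 t) := by
  have h := foldA_eq (s0 :: t) t 1 0 s0 [0] [] (by simp) (le_refl 1) (le_refl 0) (by norm_num)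
    (by norm_num [pvAt])
  norm_num [segPeak_self] at h
  rw [PySem.List.enumerate_cons, List.foldl_cons]
  have hstep : stepA (s0 :: t) (s0, 0, [0], []) (0, s0) = (s0, 0, [0], []) := by
    simp [stepA, pvAt]
  rw [hstep]
  norm_num
  exact h

-- ===== VERDICT (by name: the statement is the Claim_ definition above) =====
theorem findTimings_spec : Claim_equal_findTimings := by
  intro samples _ hpre
  unfold Spec_findTimings
  match samples with
  | [] => exact absurd rfl hpre
  | s0 :: t =>
    show (findTimings (s0 :: t)) = findTimings_alt (s0 :: t)
    unfold findTimings findTimings_alt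
    simp only []
    rw [foldA_closed s0 t, zerosB_closed s0 t]
    have hpeaks : ((0 :: crossAux s0 1 t).zip (0 :: crossAux s0 1 t).tail).map
        (fun ab => segPeak (s0 :: t) ab.1 ab.2) = peakAux (s0 :: t) 0 s0 1 t := by
      simpa using pairs_crossAux (s0 :: t) t 1 0 s0
    rw [hpeaks]
    congr 1
    congr 1
    -- timings
    set pk := peakAux (s0 :: t) 0 s0 1 t with hpk
    cases hp : pk with
    | nil => simp [PySem.List.pyRange_one_eq_nil]
    | cons p ps =>
      have h := timings_eq pk ps 1 [] (by rw [hp]; rfl) (le_refl 1)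
      have hcast : ((1 : Nat) : Int) = 1 := by norm_num
      rw [hcast] at h
      rw [hp] at h
      simpa [hp] using h
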